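-- pv_equiv track=rewrite | github.com/Gabs712/CS50p-problem-sets | week_2/plates/plates.py | sqcdigits
-- ===== SOURCE A (Python) =====
-- def sqcdigits(s):
--     start = False
--     for c in s:
--         if c.isdigit() and start == False:
--             start = True
--         elif not c.isdigit() and start == True:
--             return False
--     return True
-- ===== SOURCE B (Python) =====
-- def sqcdigits(s):
--     i = 0
--     while i < len(s) and not s[i].isdigit():
--         i += 1
--     return i == len(s) or s[i:].isdigit()
-- ===== Notes on version B (the rewrite author's own statement) =====
-- stated objective: simpler
-- what changed: Replaces A's per-character boolean-flag state machine with a locate-then-bulk-check decomposition: skip the leading non-digit prefix, then test the whole suffix with str.isdigit.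
import Mathlib
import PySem

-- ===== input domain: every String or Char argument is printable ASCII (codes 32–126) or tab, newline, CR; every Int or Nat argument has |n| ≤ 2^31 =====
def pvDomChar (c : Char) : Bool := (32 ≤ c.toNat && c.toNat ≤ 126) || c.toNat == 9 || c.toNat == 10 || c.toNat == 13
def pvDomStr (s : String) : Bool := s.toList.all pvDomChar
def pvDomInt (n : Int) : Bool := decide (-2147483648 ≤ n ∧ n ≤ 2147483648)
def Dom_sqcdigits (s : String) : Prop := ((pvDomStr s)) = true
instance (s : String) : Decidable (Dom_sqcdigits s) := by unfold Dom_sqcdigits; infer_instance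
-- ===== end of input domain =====

-- B replaces A's per-character flag-and-branch loop with skip-leading-non-digits then one bulk isdigit check on the suffix (simpler decomposition, same cost).

-- ===== PORT A =====
-- the for-loop with the 'start' flag; returning false aborts, falling off the end returns true
def sqcdigitsLoop : List Char → Bool → Bool
  | [], _ => true
  | c :: t, start =>
    if PySem.Chars.isdigit c && start == false then sqcdigitsLoop t true
    else if !PySem.Chars.isdigit c && start == true then false
    else sqcdigitsLoop t start

def sqcdigits (s : String) : Bool := sqcdigitsLoop s.toList false

-- ===== PORT B =====
-- the while loop advancing past leading non-digits, returning the remaining suffix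
def sqcdigitsSkip : List Char → List Char
  | [] => []
  | c :: t => if PySem.Chars.isdigit c then c :: t else sqcdigitsSkip t

def sqcdigits_alt (s : String) : Bool :=
  let rest := sqcdigitsSkip s.toList
  rest.isEmpty || PySem.Chars.strIsdigit rest

-- ===== PRECONDITION & SPEC =====
def Spec_sqcdigits (s : String) (out : Bool) : Prop := out = sqcdigits_alt s
instance (s : String) (out : Bool) : Decidable (Spec_sqcdigits s out) := by unfold Spec_sqcdigits; infer_instance

-- ===== CLAIM (what is proved, stated in full; the proofs are below) =====
def Claim_equal_sqcdigits : Prop := ∀ (s : String), Dom_sqcdigits s → Spec_sqcdigits s (sqcdigits s)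

-- ===== LEMMAS AND PROOFS =====

-- once the flag is set, A's loop just checks that every remaining char is a digit
theorem sqcdigitsLoop_true (cs : List Char) :
    sqcdigitsLoop cs true = cs.all PySem.Chars.isdigit := by
  induction cs with
  | nil => rfl
  | cons c t ih =>
    simp only [sqcdigitsLoop, List.all_cons]
    by_cases h : PySem.Chars.isdigit c = true <;> simp [h, ih]

theorem sqcdigitsLoop_eq_alt (cs : List Char) :
    sqcdigitsLoop cs false =
      ((sqcdigitsSkip cs).isEmpty || PySem.Chars.strIsdigit (sqcdigitsSkip cs)) := by
  induction cs with
  | nil => rfl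
  | cons c t ih =>
    simp only [sqcdigitsLoop, sqcdigitsSkip]
    by_cases h : PySem.Chars.isdigit c = true
    · simp [h, sqcdigitsLoop_true, PySem.Chars.strIsdigit]
    · simp [h, ih]

-- ===== VERDICT (by name: the statement is the Claim_ definition above) =====
theorem sqcdigits_spec : Claim_equal_sqcdigits := by
  intro s _
  unfold Spec_sqcdigits sqcdigits sqcdigits_alt
  exact sqcdigitsLoop_eq_alt s.toList
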